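-- pv_equiv track=rewrite | github.com/martinbogo/i2c_led_demos | generate_oled_lut_header.py | pack_lut
-- ===== SOURCE A (Python) =====
-- def pack_lut(values: list[int]) -> tuple[int, list[int]]:
--     first = values[0]
--     packed: list[int] = []
--     deltas = [curr - prev for prev, curr in zip(values, values[1:])]
--     for i in range(0, len(deltas), 2):
--         lo = deltas[i]
--         hi = deltas[i + 1] if i + 1 < len(deltas) else 0
--         if lo < 0 or lo > 15 or hi < 0 or hi > 15:
--             raise SystemExit(
--                 "calibration LUT cannot be packed into the current nibble-delta format; "
--                 f"deltas at positions {i + 1} and {i + 2} must stay within 0..15"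
--             )
--         packed.append(lo | (hi << 4))
--     return first, packed
-- ===== SOURCE B (Python) =====
-- def _check(lo, hi, lo_pos):
--     if lo < 0 or lo > 15 or hi < 0 or hi > 15:
--         raise SystemExit(
--             "calibration LUT cannot be packed into the current nibble-delta format; "
--             f"deltas at positions {lo_pos} and {lo_pos + 1} must stay within 0..15"
--         )
--
--
-- def pack_lut(values: list[int]) -> tuple[int, list[int]]:
--     # Single streaming pass: no materialised delta list, no index arithmetic.
--     first = values[0]
--     prev = first
--     pending = None  # (first delta of the current pair, its 1-based position)
--     packed: list[int] = []
--     pos = 0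
--     for curr in values[1:]:
--         d = curr - prev
--         prev = curr
--         pos += 1
--         if pending is None:
--             pending = (d, pos)
--         else:
--             lo, lo_pos = pending
--             pending = None
--             _check(lo, d, lo_pos)
--             packed.append(lo + 16 * d)
--     if pending is not None:
--         lo, lo_pos = pending
--         _check(lo, 0, lo_pos)
--         packed.append(lo)
--     return first, packed
-- ===== Notes on version B (the rewrite author's own statement) =====
-- stated objective: alternative
-- what changed: Replaced A's two-phase build-the-delta-list-then-index-by-2 loop with a single streaming pass over values[1:] that keeps prev and a pending low nibble, validating and emitting a byte when each pair completes.
import Mathlib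
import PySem

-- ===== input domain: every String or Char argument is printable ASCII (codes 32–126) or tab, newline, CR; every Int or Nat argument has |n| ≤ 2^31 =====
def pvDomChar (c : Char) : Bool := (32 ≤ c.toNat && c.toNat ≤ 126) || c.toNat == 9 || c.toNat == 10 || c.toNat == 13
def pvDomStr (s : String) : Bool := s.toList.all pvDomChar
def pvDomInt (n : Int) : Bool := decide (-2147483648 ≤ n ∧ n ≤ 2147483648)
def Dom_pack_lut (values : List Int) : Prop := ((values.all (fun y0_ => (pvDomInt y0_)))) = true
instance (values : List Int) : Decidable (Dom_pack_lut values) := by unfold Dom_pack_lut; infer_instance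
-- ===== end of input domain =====

-- B replaces A's build-the-delta-list-then-index-by-2 loop with one streaming pass keeping prev and a
-- pending low nibble (objective: alternative decomposition, same cost).

-- ===== PORT A =====
-- for i in range(0, len(deltas), 2): obvious step-2 index recursion over the same state;
-- `raise SystemExit(...)` is modeled as `none` (the message is not a value).
def packLoopA (deltas : List Int) (i : Nat) (packed : List Int) : Option (List Int) :=
  if h : i < deltas.length then
    let lo := deltas[i]
    let hi := if h2 : i + 1 < deltas.length then deltas[i + 1] else 0
    if lo < 0 ∨ 15 < lo ∨ hi < 0 ∨ 15 < hi then none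
    else packLoopA deltas (i + 2) (packed ++ [PySem.Int.bor lo (hi <<< 4)])
  else some packed
termination_by deltas.length - i

def pack_lut (values : List Int) : Int × List Int :=
  match PySem.List.pyGet? values 0 with
  | none => (0, [])  -- values[0] raises IndexError on []; excluded by Pre_
  | some first =>
    -- deltas = [curr - prev for prev, curr in zip(values, values[1:])]; values[1:] = drop 1 (exact)
    let deltas := (values.zip (values.drop 1)).map (fun pc => pc.2 - pc.1)
    match packLoopA deltas 0 [] with
    | none => (0, [])  -- SystemExit; excluded by Pre_
    | some packed => (first, packed)

-- ===== PORT B =====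
-- B's loop over values[1:] with state (prev, pending, packed); the position counter of Source B only feeds
-- the SystemExit message, which is modeled as `none`.
def altLoopB (prev : Int) (pending : Option Int) (packed : List Int) : List Int → Option (List Int)
  | [] =>
    match pending with
    | none => some packed
    | some lo => if lo < 0 ∨ 15 < lo ∨ (0:Int) < 0 ∨ 15 < (0:Int) then none else some (packed ++ [lo])
  | curr :: rest =>
    let d := curr - prev
    match pending with
    | none => altLoopB curr (some d) packed rest
    | some lo =>
      if lo < 0 ∨ 15 < lo ∨ d < 0 ∨ 15 < d then none
      else altLoopB curr none (packed ++ [lo + 16 * d]) rest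

def pack_lut_alt (values : List Int) : Int × List Int :=
  match values with
  | [] => (0, [])  -- IndexError on values[0]; excluded by Pre_
  | first :: rest =>
    match altLoopB first none [] rest with
    | none => (0, [])  -- SystemExit; excluded by Pre_
    | some packed => (first, packed)

-- ===== PRECONDITION & SPEC =====
-- Pre_ excludes exactly the inputs on which A raises: the empty list (IndexError on values[0]) and any
-- input with a consecutive delta outside 0..15 (SystemExit).
def Pre_pack_lut (values : List Int) : Prop :=
  values ≠ [] ∧ ∀ pc ∈ values.zip (values.drop 1), 0 ≤ pc.2 - pc.1 ∧ pc.2 - pc.1 ≤ 15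
instance (values : List Int) : Decidable (Pre_pack_lut values) := by unfold Pre_pack_lut; infer_instance
def pvWitness_pack_lut : List Int := [5, 6, 8, 10]

def Spec_pack_lut (values : List Int) (out : Int × List Int) : Prop := out = pack_lut_alt values
instance (values : List Int) (out : Int × List Int) : Decidable (Spec_pack_lut values out) := by unfold Spec_pack_lut; infer_instance

-- ===== CLAIM (what is proved, stated in full; the proofs are below) =====
def Claim_equal_pack_lut : Prop := ∀ (values : List Int), Dom_pack_lut values → Pre_pack_lut values → Spec_pack_lut values (pack_lut values)

-- ===== LEMMAS AND PROOFS =====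

-- the consecutive-difference list, structurally
def deltaList : Int → List Int → List Int
  | _, [] => []
  | p, c :: t => (c - p) :: deltaList c t

-- the packed bytes of a delta list all of whose entries lie in 0..15
def packPairs : List Int → List Int
  | [] => []
  | [lo] => [lo]
  | lo :: hi :: t => (lo + 16 * hi) :: packPairs t

lemma zip_map_eq_deltaList : ∀ (p : Int) (l : List Int),
    ((p :: l).zip l).map (fun pc => pc.2 - pc.1) = deltaList p l := by
  intro p l
  induction l generalizing p with
  | nil => rfl
  | cons c t ih => simp [deltaList, ih]

lemma bor_shift_eq (lo hi : Int) (h0 : 0 ≤ lo) (h1 : lo ≤ 15) (h2 : 0 ≤ hi) (h3 : hi ≤ 15) :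
    PySem.Int.bor lo (hi <<< 4) = lo + 16 * hi := by
  interval_cases lo <;> interval_cases hi <;> decide

lemma packLoopA_eq (deltas : List Int) (hg : ∀ d ∈ deltas, 0 ≤ d ∧ d ≤ 15) :
    ∀ (n i : Nat) (acc : List Int), deltas.length - i ≤ n →
      packLoopA deltas i acc = some (acc ++ packPairs (deltas.drop i)) := by
  intro n
  induction n with
  | zero =>
    intro i acc hn
    have hi : ¬ i < deltas.length := by omega
    rw [packLoopA, dif_neg hi, List.drop_eq_nil_of_le (by omega)]
    simp [packPairs]
  | succ n ih =>
    intro i acc hn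
    by_cases hi : i < deltas.length
    · have hlo := hg deltas[i] (List.getElem_mem hi)
      have hdrop : deltas.drop i = deltas[i] :: deltas.drop (i + 1) :=
        List.drop_eq_getElem_cons hi
      rw [packLoopA, dif_pos hi]
      by_cases h2 : i + 1 < deltas.length
      · have hhi := hg deltas[i + 1] (List.getElem_mem h2)
        have hdrop2 : deltas.drop (i + 1) = deltas[i + 1] :: deltas.drop (i + 2) :=
          List.drop_eq_getElem_cons h2
        rw [dif_pos h2, if_neg (by omega),
          ih (i + 2) _ (by omega), hdrop, hdrop2]
        simp [packPairs, bor_shift_eq _ _ hlo.1 hlo.2 hhi.1 hhi.2]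
      · have hlen : deltas.length = i + 1 := by omega
        have hdrop1 : deltas.drop (i + 1) = [] := List.drop_eq_nil_of_le (by omega)
        rw [dif_neg h2, if_neg (by omega),
          ih (i + 2) _ (by omega), hdrop, hdrop1,
          List.drop_eq_nil_of_le (by omega)]
        simp [packPairs]
    · rw [packLoopA, dif_neg hi, List.drop_eq_nil_of_le (by omega)]
      simp [packPairs]

-- what altLoopB's pending slot contributes to the remaining delta stream
def optCons : Option Int → List Int → List Int
  | none, l => l
  | some lo, l => lo :: l

def pendGood : Option Int → Prop
  | none => True
  | some lo => 0 ≤ lo ∧ lo ≤ 15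

lemma altLoopB_eq : ∀ (rest : List Int) (p : Int) (pending : Option Int) (acc : List Int),
    (∀ d ∈ deltaList p rest, 0 ≤ d ∧ d ≤ 15) → pendGood pending →
    altLoopB p pending acc rest = some (acc ++ packPairs (optCons pending (deltaList p rest))) := by
  intro rest
  induction rest with
  | nil =>
    intro p pending acc _ hp
    cases pending with
    | none => simp [altLoopB, deltaList, optCons, packPairs]
    | some lo =>
      obtain ⟨h0, h1⟩ := hp
      simp [altLoopB, deltaList, optCons, packPairs]
      omega
  | cons c t ih =>
    intro p pending acc hg hp
    have hd : 0 ≤ c - p ∧ c - p ≤ 15 := hg (c - p) (by simp [deltaList])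
    have hg' : ∀ d ∈ deltaList c t, 0 ≤ d ∧ d ≤ 15 := fun d hd' => hg d (by simp [deltaList, hd'])
    cases pending with
    | none =>
      rw [show altLoopB p none acc (c :: t) = altLoopB c (some (c - p)) acc t from rfl,
        ih c (some (c - p)) acc hg' hd]
      simp [deltaList, optCons]
    | some lo =>
      obtain ⟨h0, h1⟩ := hp
      rw [show altLoopB p (some lo) acc (c :: t)
            = if lo < 0 ∨ 15 < lo ∨ c - p < 0 ∨ 15 < (c - p) then none
              else altLoopB c none (acc ++ [lo + 16 * (c - p)]) t from rfl,
        if_neg (by omega), ih c none _ hg' trivial]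
      simp [deltaList, optCons, packPairs]

-- ===== VERDICT (by name: the statement is the Claim_ definition above) =====
theorem pack_lut_spec : Claim_equal_pack_lut := by
  intro values _ hpre
  obtain ⟨hne, hzip⟩ := hpre
  obtain ⟨first, rest, rfl⟩ : ∃ f r, values = f :: r := by
    cases values with
    | nil => exact absurd rfl hne
    | cons f r => exact ⟨f, r, rfl⟩
  unfold Spec_pack_lut pack_lut pack_lut_alt
  have hdel : ((first :: rest).zip ((first :: rest).drop 1)).map (fun pc => pc.2 - pc.1)
      = deltaList first rest := by
    simpa using zip_map_eq_deltaList first rest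
  have hg : ∀ d ∈ deltaList first rest, 0 ≤ d ∧ d ≤ 15 := by
    intro d hd
    rw [← hdel] at hd
    simp only [List.mem_map] at hd
    obtain ⟨pc, hpc, rfl⟩ := hd
    exact hzip pc hpc
  rw [PySem.List.pyGet?_zero_cons]
  simp only [hdel]
  rw [packLoopA_eq _ hg (deltaList first rest).length 0 [] (by omega),
    altLoopB_eq rest first none [] hg trivial]
  simp [optCons]
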